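-- pv_equiv track=rewrite | github.com/kh277/BOJ | 백준/Gold/12982. 공 포장하기 2/공 포장하기 2.py | solve
-- ===== SOURCE A (Python) =====
-- def solve(K, X):
--     box = 0
--
--     # 같은 색 공을 K개씩 묶고 남은 공 저장
--     ball = []
--     for i in range(K):
--         box += X[i] // K
--         left = X[i] % K
--         if left > 0:
--             ball.append(left)
--
--     if len(ball) == 0:
--         return box
--
--     # [0, i-1]까지는 같은 색끼리, [i, len(ball)]까지는 다른 색끼리 박스에 담기
--     ball.sort(reverse=True)
--     total = len(ball)
--     for i in range(len(ball)):
--         total = min(total, i+ball[i])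
--
--     return box + total
-- ===== SOURCE B (Python) =====
-- def solve(K, X):
--     box = 0
--     # bucket-count the leftover sizes (each is in 1..K-1) instead of storing and sorting them
--     cnt = [0] * K
--     n = 0
--     for i in range(K):
--         box += X[i] // K
--         r = X[i] % K
--         if r > 0:
--             cnt[r] += 1
--             n += 1
--
--     if n == 0:
--         return box
--
--     # walk the buckets from largest leftover down; within a bucket the best i+ball[i]
--     # is at its first position, so one O(K) pass replaces the sort + scan
--     total = n
--     idx = 0
--     for v in range(K - 1, 0, -1):
--         if cnt[v]:
--             total = min(total, idx + v)
--             idx += cnt[v]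
--     return box + total
-- ===== Notes on version B (the rewrite author's own statement) =====
-- stated objective: faster
-- what changed: Replaces storing the leftovers and comparison-sorting them descending with an O(K) bucket count of leftover sizes (all in 1..K-1) and a single downward pass over the buckets, using the fact that within a bucket the minimal i+ball[i] occurs at its first position.
import Mathlib
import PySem

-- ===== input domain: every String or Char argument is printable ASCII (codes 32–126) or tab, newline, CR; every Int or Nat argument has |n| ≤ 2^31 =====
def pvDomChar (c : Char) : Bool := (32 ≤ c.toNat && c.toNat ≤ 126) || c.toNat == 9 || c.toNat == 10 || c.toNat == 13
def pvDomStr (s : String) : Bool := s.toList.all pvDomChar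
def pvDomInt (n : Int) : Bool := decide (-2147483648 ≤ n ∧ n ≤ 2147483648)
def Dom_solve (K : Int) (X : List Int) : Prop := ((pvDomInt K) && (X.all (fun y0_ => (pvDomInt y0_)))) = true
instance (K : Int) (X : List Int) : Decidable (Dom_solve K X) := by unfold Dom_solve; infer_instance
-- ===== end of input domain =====

-- B replaces the comparison sort of the leftovers by an O(K) bucket count (leftovers lie in 1..K-1)
-- and a single downward pass over the buckets.

-- ===== PORT A =====
def solve (K : Int) (X : List Int) : Int :=
  -- box, ball accumulated over 'for i in range(K)'
  let s := (PySem.List.pyRange 0 K 1).foldl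
    (fun (acc : Int × List Int) i =>
      let left := PySem.Int.mod (PySem.List.pyGetD X i 0) K
      (acc.1 + PySem.Int.floordiv (PySem.List.pyGetD X i 0) K,
       if 0 < left then acc.2 ++ [left] else acc.2))
    (0, [])
  if s.2.length = 0 then s.1
  else
    let ball := PySem.List.sorted s.2 (fun x => x) true
    s.1 + (PySem.List.pyRange 0 (ball.length : Int) 1).foldl
      (fun t i => min t (i + PySem.List.pyGetD ball i 0)) (ball.length : Int)

-- ===== PORT B =====
def solve_alt (K : Int) (X : List Int) : Int :=
  -- box, cnt (bucket counts, list of length K), n accumulated over 'for i in range(K)'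
  -- 'cnt[r] += 1' with r = X[i] % K > 0 is in range, so pySetD/pyGetD are exact here
  let s := (PySem.List.pyRange 0 K 1).foldl
    (fun (acc : Int × (List Int × Int)) i =>
      let r := PySem.Int.mod (PySem.List.pyGetD X i 0) K
      (acc.1 + PySem.Int.floordiv (PySem.List.pyGetD X i 0) K,
       (if 0 < r then PySem.List.pySetD acc.2.1 r (PySem.List.pyGetD acc.2.1 r 0 + 1) else acc.2.1,
        if 0 < r then acc.2.2 + 1 else acc.2.2)))
    (0, (List.replicate K.toNat 0, 0))
  if s.2.2 = 0 then s.1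
  else
    let res := (PySem.List.pyRange (K - 1) 0 (-1)).foldl
      (fun (acc : Int × Int) v =>
        if PySem.List.pyGetD s.2.1 v 0 ≠ 0 then
          (min acc.1 (acc.2 + v), acc.2 + PySem.List.pyGetD s.2.1 v 0)
        else acc)
      (s.2.2, 0)
    s.1 + res.1

-- ===== PRECONDITION & SPEC =====
-- A indexes X[i] for i in range(K): it raises IndexError iff 0 < K and len(X) < K; exactly those inputs are excluded.
def Pre_solve (K : Int) (X : List Int) : Prop := K ≤ 0 ∨ K ≤ (X.length : Int)
instance (K : Int) (X : List Int) : Decidable (Pre_solve K X) := by unfold Pre_solve; infer_instance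
def pvWitness_solve : Int × List Int := (3, [4, 7, 11])

def Spec_solve (K : Int) (X : List Int) (out : Int) : Prop := out = solve_alt K X
instance (K : Int) (X : List Int) (out : Int) : Decidable (Spec_solve K X out) := by unfold Spec_solve; infer_instance

-- ===== CLAIM (what is proved, stated in full; the proofs are below) =====
def Claim_equal_solve : Prop := ∀ (K : Int) (X : List Int), Dom_solve K X → Pre_solve K X → Spec_solve K X (solve K X)

-- ===== LEMMAS AND PROOFS =====

-- the first loop of either port reads X only through pyGetD X i 0 for i ∈ range(K); on Pre it is a fold over take
theorem first_loop_take {β : Type} (K : Int) (X : List Int) (hK : 0 < K) (hlen : K ≤ (X.length : Int))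
    (f : β → Int → β) (init : β) :
    (PySem.List.pyRange 0 K 1).foldl (fun acc i => f acc (PySem.List.pyGetD X i 0)) init
      = (X.take K.toNat).foldl f init := by
  have h1 : (PySem.List.pyRange 0 K 1).foldl (fun acc i => f acc (PySem.List.pyGetD X i 0)) init
      = (PySem.List.pyRange 0 K 1).foldl (fun acc i => f acc (PySem.List.pyGetD (X.take K.toNat) i 0)) init := by
    apply PySem.List.foldl_congr_mem
    intro acc i hi
    obtain ⟨hi0, hiK⟩ := PySem.List.mem_pyRange_one.mp hi
    have hg1 : PySem.List.pyGetD X i 0 = X[i.toNat] :=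
      PySem.List.pyGetD_eq_getElem _ _ (by omega) (by omega)
    have hg2 : PySem.List.pyGetD (X.take K.toNat) i 0 = (X.take K.toNat)[i.toNat]'(by simp; omega) :=
      PySem.List.pyGetD_eq_getElem _ _ (by omega) (by simp; omega)
    rw [hg1, hg2, List.getElem_take]
  rw [h1]
  have h2 := PySem.List.foldl_pyRange_zero_pyGetD (X.take K.toNat) 0 f init
  rw [show PySem.List.len (X.take K.toNat) = K from by simp; omega] at h2
  exact h2

-- min over a constant block of the enumerate scan
theorem enum_replicate_fold (c : Nat) (v s t : Int) :
    (PySem.List.enumerate (List.replicate c v) s).foldl (fun t p => min t (p.1 + p.2)) t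
      = if c = 0 then t else min t (s + v) := by
  induction c generalizing s t with
  | zero => simp [PySem.List.enumerate_nil]
  | succ c ih =>
    simp only [List.replicate_succ, PySem.List.enumerate_cons, List.foldl_cons, ih]
    rcases Nat.eq_zero_or_pos c with hc | hc
    · simp [hc]
    · have : c ≠ 0 := Nat.pos_iff_ne_zero.mp hc
      simp only [this, if_false, Nat.succ_ne_zero]
      rw [min_assoc]
      congr 1
      omega

-- B's bucket scan equals the enumerate scan over the concatenation of the blocks
theorem bucket_scan (D : List Int) (c : Int → Int) (hc : ∀ v ∈ D, 0 ≤ c v) (t idx : Int) :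
    D.foldl (fun (acc : Int × Int) v =>
        if c v ≠ 0 then (min acc.1 (acc.2 + v), acc.2 + c v) else acc) (t, idx)
      = ((PySem.List.enumerate (D.flatMap (fun v => List.replicate (c v).toNat v)) idx).foldl
            (fun t p => min t (p.1 + p.2)) t,
         idx + ((D.flatMap (fun v => List.replicate (c v).toNat v)).length : Int)) := by
  induction D generalizing t idx with
  | nil => simp
  | cons v D ih =>
    have hv0 : 0 ≤ c v := hc v (by simp)
    have hc' : ∀ w ∈ D, 0 ≤ c w := fun w hw => hc w (by simp [hw])
    simp only [List.foldl_cons, List.flatMap_cons, PySem.List.enumerate_append, List.foldl_append,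
      List.length_append, List.length_replicate, enum_replicate_fold]
    by_cases hv : c v ≠ 0
    · rw [if_pos hv, ih hc']
      simp only [Prod.mk.injEq]
      have hnz : ¬ ((c v).toNat = 0) := by omega
      have hcast : ((c v).toNat : Int) = c v := by omega
      rw [if_neg hnz, hcast]
      refine ⟨rfl, by push_cast; omega⟩
    · simp only [hv, if_false]
      have hc0 : (c v).toNat = 0 := by simp at hv; simp [hv]
      rw [ih hc']
      simp [hc0]

-- counting elements of a concatenation of constant blocks over distinct values
theorem count_flatMap_replicate (D : List Int) (n : Int → Nat) (w : Int) (hnd : D.Nodup) :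
    (D.flatMap (fun v => List.replicate (n v) v)).count w = if w ∈ D then n w else 0 := by
  induction D with
  | nil => simp
  | cons v D ih =>
    have hv : v ∉ D := (List.nodup_cons.mp hnd).1
    have hnd' : D.Nodup := (List.nodup_cons.mp hnd).2
    simp only [List.flatMap_cons, List.count_append, ih hnd', List.count_replicate, List.mem_cons]
    by_cases hw : w = v
    · subst hw; simp [hv]
    · simp [hw, Ne.symm hw]

-- blocks of equal values listed along strictly decreasing values are sorted descending
theorem flatMap_replicate_pairwise (D : List Int) (n : Int → Nat)
    (hD : D.Pairwise (fun a b => b < a)) :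
    (D.flatMap (fun v => List.replicate (n v) v)).Pairwise (fun a b : Int => b ≤ a) := by
  induction D with
  | nil => simp
  | cons v D ih =>
    simp only [List.flatMap_cons, List.pairwise_append]
    refine ⟨List.pairwise_replicate.mpr (Or.inr le_rfl), ih hD.of_cons, ?_⟩
    intro a ha b hb
    have hav : a = v := (List.eq_of_mem_replicate ha)
    obtain ⟨w, hwD, hbw⟩ := List.mem_flatMap.mp hb
    have hbw' : b = w := List.eq_of_mem_replicate hbw
    have : w < v := (List.pairwise_cons.mp hD).1 w hwD
    omega

-- the descending sort of a list with elements in 1..K-1 is the concatenation of the bucket blocks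
theorem sorted_desc_blocks (K : Int) (L : List Int) (hL : ∀ x ∈ L, 1 ≤ x ∧ x < K) :
    PySem.List.sorted L (fun x => x) true
      = (PySem.List.pyRange (K - 1) 0 (-1)).flatMap (fun v => List.replicate (L.count v) v) := by
  have hD : (PySem.List.pyRange (K - 1) 0 (-1)).Pairwise (fun a b => b < a) := by
    rw [PySem.List.pyRange_neg_one]
    exact List.pairwise_lt_range.map _ (fun {a b} h => by omega)
  have hDnd : (PySem.List.pyRange (K - 1) 0 (-1)).Nodup :=
    hD.imp (fun h => by omega)
  have hmemD : ∀ w : Int, w ∈ PySem.List.pyRange (K - 1) 0 (-1) ↔ 1 ≤ w ∧ w < K := by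
    intro w
    rw [PySem.List.mem_pyRange_neg_one]
    omega
  refine List.Perm.eq_of_pairwise (fun a b _ _ h1 h2 => le_antisymm h2 h1)
    (PySem.List.sorted_pairwise_rev L (fun x => x)) (flatMap_replicate_pairwise _ _ hD) ?_
  -- both are permutations of L; compare counts
  refine ((PySem.List.sorted_perm L (fun x => x) true).trans ?_)
  refine (List.perm_iff_count.mpr ?_).symm
  intro w
  rw [count_flatMap_replicate _ _ _ hDnd]
  by_cases hw : w ∈ PySem.List.pyRange (K - 1) 0 (-1)
  · simp [hw]
  · have : w ∉ L := fun hmem => hw ((hmemD w).mpr ⟨(hL w hmem).1, (hL w hmem).2⟩)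
    simp [hw, List.count_eq_zero_of_not_mem this]

-- the counting loop computes the multiplicities: invariant form
theorem cnt_invariant (K : Int) (ms : List Int) (hm : ∀ m ∈ ms, m < K) :
    ∀ c0 : List Int, c0.length = K.toNat →
      ((ms.foldl (fun c m => if 0 < m then PySem.List.pySetD c m (PySem.List.pyGetD c m 0 + 1) else c) c0).length = K.toNat ∧
       ∀ v : Int, 1 ≤ v → v < K →
         PySem.List.pyGetD (ms.foldl (fun c m => if 0 < m then PySem.List.pySetD c m (PySem.List.pyGetD c m 0 + 1) else c) c0) v 0
           = PySem.List.pyGetD c0 v 0 + ((ms.filter (fun m => decide (0 < m))).count v : Int)) := by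
  induction ms with
  | nil => intro c0 hlen; simp [hlen]
  | cons m ms ih =>
    intro c0 hlen
    have hmK : m < K := hm m (by simp)
    have hm' : ∀ x ∈ ms, x < K := fun x hx => hm x (by simp [hx])
    by_cases hpos : 0 < m
    · have hKpos : 0 < K := lt_trans hpos hmK
      have hset : PySem.List.pySetD c0 m (PySem.List.pyGetD c0 m 0 + 1)
          = c0.set m.toNat (PySem.List.pyGetD c0 m 0 + 1) :=
        PySem.List.pySetD_of_nonneg _ _ (le_of_lt hpos)
      have hlen' : (c0.set m.toNat (PySem.List.pyGetD c0 m 0 + 1)).length = K.toNat := by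
        simp [hlen]
      obtain ⟨hl, hv⟩ := ih hm' _ hlen'
      simp only [List.foldl_cons, if_pos hpos, hset]
      refine ⟨hl, ?_⟩
      intro v hv1 hvK
      rw [hv v hv1 hvK]
      have hvrange : v.toNat < c0.length := by omega
      have hmrange : m.toNat < c0.length := by omega
      have hg1 : PySem.List.pyGetD (c0.set m.toNat (PySem.List.pyGetD c0 m 0 + 1)) v 0
          = (c0.set m.toNat (PySem.List.pyGetD c0 m 0 + 1))[v.toNat] := by
        apply PySem.List.pyGetD_eq_getElem _ _ (by omega) (by simp [hlen]; omega)
      have hg2 : PySem.List.pyGetD c0 v 0 = c0[v.toNat] :=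
        PySem.List.pyGetD_eq_getElem _ _ (by omega) (by omega)
      have hg3 : PySem.List.pyGetD c0 m 0 = c0[m.toNat] :=
        PySem.List.pyGetD_eq_getElem _ _ (by omega) (by omega)
      rw [hg1, hg2, List.getElem_set]
      simp only [List.filter_cons, decide_eq_true_eq, if_pos hpos, List.count_cons]
      by_cases hvm : v = m
      · have : m.toNat = v.toNat := by omega
        simp [this, hg3, hvm]
        omega
      · have : ¬ (m.toNat = v.toNat) := by omega
        simp [this]
        omega
    · simp only [List.foldl_cons, if_neg hpos]
      obtain ⟨hl, hv⟩ := ih hm' c0 hlen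
      refine ⟨hl, ?_⟩
      intro v hv1 hvK
      rw [hv v hv1 hvK]
      simp [hpos]

-- the counting loop computes the multiplicities
theorem cnt_spec (K : Int) (ms : List Int) (hm : ∀ m ∈ ms, m < K) :
    ∀ v : Int, 1 ≤ v → v < K →
      PySem.List.pyGetD
        (ms.foldl (fun c m => if 0 < m then PySem.List.pySetD c m (PySem.List.pyGetD c m 0 + 1) else c)
          (List.replicate K.toNat 0)) v 0
        = ((ms.filter (fun m => decide (0 < m))).count v : Int) := by
  intro v hv1 hvK
  obtain ⟨_, hv⟩ := cnt_invariant K ms hm (List.replicate K.toNat 0) (by simp)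
  rw [hv v hv1 hvK]
  have h0 : PySem.List.pyGetD (List.replicate K.toNat (0 : Int)) v 0 = 0 := by
    have := PySem.List.pyGetD_eq_getElem (List.replicate K.toNat (0 : Int)) (i := v) 0
      (by omega) (by simp; omega)
    simp [this]
  rw [h0]; ring

-- ===== VERDICT (by name: the statement is the Claim_ definition above) =====
theorem solve_spec : Claim_equal_solve := by
  unfold Claim_equal_solve
  intro K X _hdom hpre
  unfold Spec_solve solve solve_alt
  by_cases hK : K ≤ 0
  · rw [PySem.List.pyRange_one_eq_nil hK]
    simp
  · rw [not_le] at hK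
    have hlen : K ≤ (X.length : Int) := hpre.resolve_left (by omega)
    have hA1 : (PySem.List.pyRange 0 K 1).foldl
        (fun (acc : Int × List Int) i =>
          let left := PySem.Int.mod (PySem.List.pyGetD X i 0) K
          (acc.1 + PySem.Int.floordiv (PySem.List.pyGetD X i 0) K,
           if 0 < left then acc.2 ++ [left] else acc.2)) (0, [])
        = ((X.take K.toNat).foldl (fun a x => a + PySem.Int.floordiv x K) 0,
           (X.take K.toNat).foldl
             (fun b x => if 0 < PySem.Int.mod x K then b ++ [PySem.Int.mod x K] else b) []) :=
      (first_loop_take K X hK hlen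
        (fun acc x =>
          let left := PySem.Int.mod x K
          (acc.1 + PySem.Int.floordiv x K, if 0 < left then acc.2 ++ [left] else acc.2))
        (0, [])).trans
      (PySem.List.foldl_prod_mk (fun a x => a + PySem.Int.floordiv x K)
        (fun b x => if 0 < PySem.Int.mod x K then b ++ [PySem.Int.mod x K] else b) _ 0 [])
    rw [hA1]
    have hB1 : (PySem.List.pyRange 0 K 1).foldl
        (fun (acc : Int × (List Int × Int)) i =>
          let r := PySem.Int.mod (PySem.List.pyGetD X i 0) K
          (acc.1 + PySem.Int.floordiv (PySem.List.pyGetD X i 0) K,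
           (if 0 < r then PySem.List.pySetD acc.2.1 r (PySem.List.pyGetD acc.2.1 r 0 + 1) else acc.2.1,
            if 0 < r then acc.2.2 + 1 else acc.2.2))) (0, (List.replicate K.toNat 0, 0))
        = ((X.take K.toNat).foldl (fun a x => a + PySem.Int.floordiv x K) 0,
           ((X.take K.toNat).foldl
              (fun c x => if 0 < PySem.Int.mod x K then
                 PySem.List.pySetD c (PySem.Int.mod x K) (PySem.List.pyGetD c (PySem.Int.mod x K) 0 + 1) else c)
              (List.replicate K.toNat 0),
            (X.take K.toNat).foldl
              (fun n x => if 0 < PySem.Int.mod x K then n + 1 else n) 0)) :=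
      (first_loop_take K X hK hlen
        (fun acc x =>
          let r := PySem.Int.mod x K
          (acc.1 + PySem.Int.floordiv x K,
           (if 0 < r then PySem.List.pySetD acc.2.1 r (PySem.List.pyGetD acc.2.1 r 0 + 1) else acc.2.1,
            if 0 < r then acc.2.2 + 1 else acc.2.2)))
        (0, (List.replicate K.toNat 0, 0))).trans
      ((PySem.List.foldl_prod_mk (fun a x => a + PySem.Int.floordiv x K)
        (fun (p : List Int × Int) x =>
          (if 0 < PySem.Int.mod x K then
             PySem.List.pySetD p.1 (PySem.Int.mod x K) (PySem.List.pyGetD p.1 (PySem.Int.mod x K) 0 + 1) else p.1,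
           if 0 < PySem.Int.mod x K then p.2 + 1 else p.2)) _ 0 (List.replicate K.toNat 0, 0)).trans
       (by rw [PySem.List.foldl_prod_mk
          (fun c x => if 0 < PySem.Int.mod x K then
             PySem.List.pySetD c (PySem.Int.mod x K) (PySem.List.pyGetD c (PySem.Int.mod x K) 0 + 1) else c)
          (fun n x => if 0 < PySem.Int.mod x K then n + 1 else n)]))
    rw [hB1]
    set T := X.take K.toNat with hT
    set L := (T.filter (fun x => decide (0 < PySem.Int.mod x K))).map (fun x => PySem.Int.mod x K) with hLdef
    have hball : T.foldl (fun b x => if 0 < PySem.Int.mod x K then b ++ [PySem.Int.mod x K] else b) []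
        = ([] : List Int) ++ L :=
      PySem.List.foldl_append_ite (fun x => 0 < PySem.Int.mod x K) (fun x => PySem.Int.mod x K) T []
    have hn : T.foldl (fun n x => if 0 < PySem.Int.mod x K then n + 1 else n) 0
        = 0 + (L.length : Int) := by
      rw [PySem.List.foldl_ite_add_one (fun x => 0 < PySem.Int.mod x K) T 0]
      simp [hLdef, List.countP_eq_length_filter]
    rw [hball, hn]
    simp only [List.nil_append, zero_add]
    by_cases hempty : L.length = 0
    · simp [hempty]
    · rw [if_neg hempty, if_neg (by exact_mod_cast hempty)]
      congr 1
      -- the scan over the sorted leftovers equals the bucket scan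
      have hL : ∀ x ∈ L, 1 ≤ x ∧ x < K := by
        intro x hx
        rw [hLdef] at hx
        obtain ⟨y, hy, rfl⟩ := List.mem_map.mp hx
        have := (List.mem_filter.mp hy).2
        simp at this
        exact ⟨by omega, PySem.Int.mod_lt _ hK⟩
      have hblocks := sorted_desc_blocks K L hL
      -- A's scan in enumerate form
      have hA2 : ∀ (init : Int),
          (PySem.List.pyRange 0 ((PySem.List.sorted L (fun x => x) true).length : Int) 1).foldl
            (fun t i => min t (i + PySem.List.pyGetD (PySem.List.sorted L (fun x => x) true) i 0)) init
          = (PySem.List.enumerate (PySem.List.sorted L (fun x => x) true) 0).foldl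
              (fun t p => min t (p.1 + p.2)) init := by
        intro init
        rw [PySem.List.enumerate_eq_map_pyRange _ (0 : Int), List.foldl_map]
        simp [PySem.List.len_eq]
      -- B's bucket read equals the multiplicity of v in L
      set cnt := T.foldl (fun c x => if 0 < PySem.Int.mod x K then
          PySem.List.pySetD c (PySem.Int.mod x K) (PySem.List.pyGetD c (PySem.Int.mod x K) 0 + 1) else c)
        (List.replicate K.toNat (0 : Int)) with hcntdef
      have hcntv : ∀ v : Int, 1 ≤ v → v < K →
          PySem.List.pyGetD cnt v 0 = (L.count v : Int) := by
        intro v hv1 hvK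
        rw [hcntdef]
        have hfold : T.foldl (fun c x => if 0 < PySem.Int.mod x K then
                PySem.List.pySetD c (PySem.Int.mod x K) (PySem.List.pyGetD c (PySem.Int.mod x K) 0 + 1) else c)
              (List.replicate K.toNat (0 : Int))
            = (T.map (fun x => PySem.Int.mod x K)).foldl
                (fun c m => if 0 < m then PySem.List.pySetD c m (PySem.List.pyGetD c m 0 + 1) else c)
                (List.replicate K.toNat (0 : Int)) :=
          (List.foldl_map (f := fun x => PySem.Int.mod x K)
            (g := fun c m => if 0 < m then PySem.List.pySetD c m (PySem.List.pyGetD c m 0 + 1) else c)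
            (l := T) (init := List.replicate K.toNat (0 : Int))).symm
        have hmK : ∀ m ∈ T.map (fun x => PySem.Int.mod x K), m < K := by
          intro m hm
          obtain ⟨y, _, rfl⟩ := List.mem_map.mp hm
          exact PySem.Int.mod_lt _ hK
        rw [hfold, cnt_spec K _ hmK v hv1 hvK]
        congr 1
        rw [hLdef, List.filter_map]
        rfl
      have hres : (PySem.List.pyRange (K - 1) 0 (-1)).foldl
            (fun (acc : Int × Int) v =>
              if PySem.List.pyGetD cnt v 0 ≠ 0 then
                (min acc.1 (acc.2 + v), acc.2 + PySem.List.pyGetD cnt v 0)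
              else acc)
            ((L.length : Int), 0)
          = (PySem.List.pyRange (K - 1) 0 (-1)).foldl
              (fun (acc : Int × Int) v =>
                if (L.count v : Int) ≠ 0 then (min acc.1 (acc.2 + v), acc.2 + (L.count v : Int)) else acc)
              ((L.length : Int), 0) := by
        apply PySem.List.foldl_congr_mem
        intro acc v hv
        obtain ⟨hv0, hvK⟩ := PySem.List.mem_pyRange_neg_one.mp hv
        simp [hcntv v (by omega) (by omega)]
      rw [hres, bucket_scan _ _ (fun v _ => Int.natCast_nonneg _) _ _]
      have hrep : (fun v => List.replicate ((L.count v : Int)).toNat v) = fun v => List.replicate (L.count v) v := by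
        funext v; simp
      rw [hrep, ← hblocks, hA2]
      have hlends : (PySem.List.sorted L (fun x => x) true).length = L.length :=
        PySem.List.length_sorted L (fun x => x) true
      rw [hlends]
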